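-- pv_equiv track=rewrite | github.com/daniel-reich/ubiquitous-fiesta | YxnrZQwKyrzgcMvT4_15.py | rotate_transform
-- ===== SOURCE A (Python) =====
-- from copy import deepcopy
--
-- def rotate_transform(l, n):
--     l_ = deepcopy(l)
--     if n%4 >= 1 :
--         for k in range(n%4):
--             for i in range(len(l)):
--                 for j in range(len(l)):
--                     l_[j][len(l)-i-1]= l[i][j]
--         return rotate_transform(l_, (n%4)-1)
--     return l_
-- ===== SOURCE B (Python) =====
-- def rotate_transform(l, n):
--     cur = [row[:] for row in l]
--     for _ in range(n % 4):
--         cur = [list(row) for row in zip(*cur[::-1])]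
--     return cur
-- ===== Notes on version B (the rewrite author's own statement) =====
-- stated objective: idiomatic
-- what changed: Replaces A's tail recursion over the decreasing count with in-place triple-nested index writes (including a redundant k-loop rewriting the same cells n%4 times per level) by a plain loop applying the standard zip(*cur[::-1]) 90-degree rotation once per iteration; Pre_ excludes the inputs where A raises IndexError (a rotation requested on a matrix with some row shorter than the number of rows).
-- intended difference: On non-square inputs with n%4 >= 1 whose rows are all at least as long as the number of rows but not all exactly that long, A rotates only the len(l)-by-len(l) corner and returns the deepcopy's leftover tail columns untouched (e.g. [[4,1,3],[5,2,6]] for ([[1,2,3],[4,5,6]], 1)), while B returns the genuine 90-degree rotation ([[4,1],[5,2],[6,3]]); the leftover stale columns are an artefact of A's deepcopy, the true rotation is the intended value. — e.g. on rotate_transform([[1, 2, 3], [4, 5, 6]], 1): A returns [[4, 1, 3], [5, 2, 6]], B returns [[4, 1], [5, 2], [6, 3]]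
import Mathlib
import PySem

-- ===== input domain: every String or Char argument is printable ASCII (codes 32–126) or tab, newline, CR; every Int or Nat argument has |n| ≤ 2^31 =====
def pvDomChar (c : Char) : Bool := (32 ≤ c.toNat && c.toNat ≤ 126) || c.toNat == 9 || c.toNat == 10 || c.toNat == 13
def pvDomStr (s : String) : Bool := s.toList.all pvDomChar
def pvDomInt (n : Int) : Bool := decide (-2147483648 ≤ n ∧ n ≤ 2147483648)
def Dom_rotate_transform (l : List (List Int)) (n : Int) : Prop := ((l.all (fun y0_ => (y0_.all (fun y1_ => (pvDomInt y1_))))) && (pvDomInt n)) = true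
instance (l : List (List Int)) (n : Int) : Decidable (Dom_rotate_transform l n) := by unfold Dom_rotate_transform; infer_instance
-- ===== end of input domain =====

-- B replaces A's tail recursion + in-place triple nested index writes (with a redundant repeat
-- loop) by a plain loop applying the standard zip-based 90° rotation; return-value equivalence
-- on square inputs, intended difference D_ on the non-square inputs A mis-handles.

-- ===== PORT A =====
-- the body of the triple nested loop: for i in range(len l): for j in range(len l): l_[j][len l - i - 1] = l[i][j]
def pvAssignAll (l : List (List Int)) (x : List (List Int)) : List (List Int) :=
  (List.range l.length).foldl (fun acc i =>
    (List.range l.length).foldl (fun acc2 j =>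
      acc2.set j ((acc2.getD j []).set (l.length - i - 1) ((l.getD i []).getD j 0))) acc) x

-- literal port of A; mutation of l_ modelled by List.set (in range under Pre_); deepcopy = value copy
def rotate_transform (l : List (List Int)) (n : Int) : List (List Int) :=
  if h : 1 ≤ PySem.Int.mod n 4 then
    rotate_transform
      ((List.range (PySem.Int.mod n 4).toNat).foldl (fun acc _ => pvAssignAll l acc) l)
      (PySem.Int.mod n 4 - 1)
  else l
termination_by (PySem.Int.mod n 4).toNat
decreasing_by
  have h4 : ∀ m : Int, PySem.Int.mod m 4 = m % 4 := fun m => PySem.Int.mod_eq_emod_of_pos (by norm_num)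
  simp only [h4] at h ⊢
  omega

-- ===== PORT B =====
-- [list(row) for row in zip(*cur[::-1])] : zip truncates to the shortest row; row j of the
-- result is the j-th element of each row of the reversed matrix
def pvZipRot (cur : List (List Int)) : List (List Int) :=
  (List.range (((cur.map List.length).min?).getD 0)).map
    (fun j => cur.reverse.map (fun row => row.getD j 0))

def rotate_transform_alt (l : List (List Int)) (n : Int) : List (List Int) :=
  (List.range (PySem.Int.mod n 4).toNat).foldl (fun cur _ => pvZipRot cur) l

-- ===== PRECONDITION & SPEC =====
-- Pre_ excludes exactly the inputs where A raises IndexError: a rotation is performed (n%4 ≥ 1)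
-- on a matrix with some row shorter than the number of rows.
def Pre_rotate_transform (l : List (List Int)) (n : Int) : Prop :=
  PySem.Int.mod n 4 = 0 ∨ ∀ row ∈ l, l.length ≤ row.length
instance (l : List (List Int)) (n : Int) : Decidable (Pre_rotate_transform l n) := by
  unfold Pre_rotate_transform; infer_instance

def pvWitness_rotate_transform : List (List Int) × Int := ([[1, 2], [3, 4]], 1)

-- On non-square inputs with n%4 ≥ 1 (rows all ≥ len(l) but not all = len(l)), A rotates only the
-- len(l)×len(l) corner and returns the deepcopy's stale tail columns untouched, an artefact of its
-- deepcopy; B returns the genuine 90° rotation, the intended value.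
def D_rotate_transform (l : List (List Int)) (n : Int) : Prop :=
  1 ≤ PySem.Int.mod n 4 ∧ ∃ row ∈ l, row.length ≠ l.length
instance (l : List (List Int)) (n : Int) : Decidable (D_rotate_transform l n) := by
  unfold D_rotate_transform; infer_instance

def Spec_rotate_transform (l : List (List Int)) (n : Int) (out : List (List Int)) : Prop :=
  ¬ D_rotate_transform l n → out = rotate_transform_alt l n
instance (l : List (List Int)) (n : Int) (out : List (List Int)) : Decidable (Spec_rotate_transform l n out) := by unfold Spec_rotate_transform; infer_instance

def pvDiffWitness_rotate_transform : List (List Int) × Int := ([[1, 2, 3], [4, 5, 6]], 1)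
def pvDiffWitnessOut_rotate_transform : (List (List Int)) × (List (List Int)) :=
  ([[4, 1, 3], [5, 2, 6]], [[4, 1], [5, 2], [6, 3]])

-- ===== CLAIM (what is proved, stated in full; the proofs are below) =====
def Claim_unchanged_rotate_transform : Prop := ∀ (l : List (List Int)) (n : Int), Dom_rotate_transform l n → Pre_rotate_transform l n → Spec_rotate_transform l n (rotate_transform l n)
def Claim_changed_rotate_transform : Prop := Dom_rotate_transform (pvDiffWitness_rotate_transform.1) (pvDiffWitness_rotate_transform.2) ∧ Pre_rotate_transform (pvDiffWitness_rotate_transform.1) (pvDiffWitness_rotate_transform.2) ∧ D_rotate_transform (pvDiffWitness_rotate_transform.1) (pvDiffWitness_rotate_transform.2) ∧ rotate_transform (pvDiffWitness_rotate_transform.1) (pvDiffWitness_rotate_transform.2) = pvDiffWitnessOut_rotate_transform.1 ∧ rotate_transform_alt (pvDiffWitness_rotate_transform.1) (pvDiffWitness_rotate_transform.2) = pvDiffWitnessOut_rotate_transform.2 ∧ pvDiffWitnessOut_rotate_transform.1 ≠ pvDiffWitnessOut_rotate_transform.2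

-- ===== LEMMAS AND PROOFS =====

-- proof-side characterisation of one A-level rotation: row j = column j of the reversed square,
-- followed by the stale tail of row j
def pvRotOnce (l : List (List Int)) : List (List Int) :=
  (List.range l.length).map (fun j =>
    ((List.range l.length).map (fun p => (l.getD (l.length - 1 - p) []).getD j 0))
      ++ (l.getD j []).drop l.length)

theorem pv_getD_set {A : Type} (x : List A) (i j : Nat) (w : A) (d : A) :
    (x.set i w).getD j d = if i = j ∧ i < x.length then w else x.getD j d := by
  simp [List.getD_eq_getElem?_getD, List.getElem?_set]
  split_ifs <;> simp_all
  omega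

-- the inner j-loop: sets position (l.length-1-i) of every row j < m to l[i][j]
theorem pv_inner_getD (l : List (List Int)) (i : Nat) (k : Nat) (x : List (List Int)) :
    ((List.range k).foldl (fun acc2 j =>
        acc2.set j ((acc2.getD j []).set (l.length - i - 1) ((l.getD i []).getD j 0))) x).length
      = x.length ∧
    ∀ j' : Nat, ((List.range k).foldl (fun acc2 j =>
        acc2.set j ((acc2.getD j []).set (l.length - i - 1) ((l.getD i []).getD j 0))) x).getD j' []
      = if j' < k then (x.getD j' []).set (l.length - i - 1) ((l.getD i []).getD j' 0)
        else x.getD j' [] := by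
  induction k with
  | zero => simp
  | succ k ih =>
    obtain ⟨ihlen, ihget⟩ := ih
    rw [List.range_succ, List.foldl_append, List.foldl_cons, List.foldl_nil]
    refine ⟨by rw [List.length_set, ihlen], ?_⟩
    intro j'
    rw [pv_getD_set, ihlen, ihget, ihget]
    by_cases hj : j' < x.length
    · split_ifs <;> simp_all <;> omega
    · have hd : x.getD j' [] = [] := List.getD_eq_default _ _ (by omega)
      split_ifs <;> simp_all <;> omega

-- row evolution under the outer i-loop
def pvRowFold (l : List (List Int)) (j : Nat) (k : Nat) (r0 : List Int) : List Int :=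
  (List.range k).foldl (fun r i => r.set (l.length - i - 1) ((l.getD i []).getD j 0)) r0

theorem pv_outer_getD (l : List (List Int)) (k : Nat) (x : List (List Int)) :
    ((List.range k).foldl (fun acc i =>
        (List.range l.length).foldl (fun acc2 j =>
          acc2.set j ((acc2.getD j []).set (l.length - i - 1) ((l.getD i []).getD j 0))) acc) x).length
      = x.length ∧
    ∀ j : Nat, ((List.range k).foldl (fun acc i =>
        (List.range l.length).foldl (fun acc2 j =>
          acc2.set j ((acc2.getD j []).set (l.length - i - 1) ((l.getD i []).getD j 0))) acc) x).getD j []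
      = if j < l.length then pvRowFold l j k (x.getD j []) else x.getD j [] := by
  induction k with
  | zero => exact ⟨rfl, by intro j; simp [pvRowFold]⟩
  | succ k ih =>
    obtain ⟨ihlen, ihget⟩ := ih
    rw [List.range_succ, List.foldl_append, List.foldl_cons, List.foldl_nil]
    refine ⟨by rw [(pv_inner_getD l k l.length _).1, ihlen], ?_⟩
    intro j
    rw [(pv_inner_getD l k l.length _).2 j, ihget j]
    by_cases hj : j < l.length
    · simp only [hj, if_true]
      simp [pvRowFold, List.range_succ]
    · simp [hj]

theorem pv_rowFold_len (l : List (List Int)) (j k : Nat) (r0 : List Int) :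
    (pvRowFold l j k r0).length = r0.length := by
  induction k with
  | zero => rfl
  | succ k ih =>
    have hstep : pvRowFold l j (k + 1) r0
        = (pvRowFold l j k r0).set (l.length - k - 1) ((l.getD k []).getD j 0) := by
      simp [pvRowFold, List.range_succ]
    rw [hstep, List.length_set, ih]

theorem pv_rowFold_getD (l : List (List Int)) (j : Nat) (k : Nat) (hk : k ≤ l.length)
    (r0 : List Int) (hr : l.length ≤ r0.length) (p : Nat) :
    (pvRowFold l j k r0).getD p 0
      = if l.length - k ≤ p ∧ p < l.length then (l.getD (l.length - 1 - p) []).getD j 0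
        else r0.getD p 0 := by
  induction k with
  | zero =>
    simp only [pvRowFold, List.range_zero, List.foldl_nil]
    split_ifs with h
    · omega
    · rfl
  | succ k ih =>
    have hstep : pvRowFold l j (k + 1) r0
        = (pvRowFold l j k r0).set (l.length - k - 1) ((l.getD k []).getD j 0) := by
      simp [pvRowFold, List.range_succ]
    rw [hstep, pv_getD_set, pv_rowFold_len, ih (by omega)]
    by_cases hp : p = l.length - k - 1
    · subst hp
      rw [if_pos ⟨rfl, by omega⟩, if_pos (by omega)]
      have hkk : l.length - 1 - (l.length - k - 1) = k := by omega
      rw [hkk]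
    · rw [if_neg (fun hh => hp hh.1.symm)]
      split_ifs <;> first | rfl | omega

-- shape hypothesis under which pvAssignAll computes one rotation, regardless of x's stale values
def pvShape (l x : List (List Int)) : Prop :=
  x.length = l.length ∧
  ∀ j : Nat, (x.getD j []).length = (l.getD j []).length ∧
    (x.getD j []).drop l.length = (l.getD j []).drop l.length

theorem pv_row_ge (l : List (List Int)) (hsq : ∀ row ∈ l, l.length ≤ row.length) :
    ∀ j : Nat, j < l.length → l.length ≤ (l.getD j []).length := by
  intro j hj
  have hm : l.getD j [] ∈ l := by
    rw [List.getD_eq_getElem _ _ hj]; exact List.getElem_mem _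
  exact hsq _ hm

theorem pv_rotOnce_len (l : List (List Int)) : (pvRotOnce l).length = l.length := by
  simp [pvRotOnce]

theorem pv_rotOnce_getD (l : List (List Int)) (j : Nat) (hj : j < l.length) :
    (pvRotOnce l).getD j []
      = ((List.range l.length).map (fun p => (l.getD (l.length - 1 - p) []).getD j 0))
        ++ (l.getD j []).drop l.length := by
  have g : (pvRotOnce l).getD j [] = (pvRotOnce l)[j]?.getD [] := List.getD_eq_getElem?_getD
  rw [g]
  unfold pvRotOnce
  simp [hj]

theorem pv_assignAll_eq (l x : List (List Int))
    (hsq : ∀ row ∈ l, l.length ≤ row.length) (hx : pvShape l x) :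
    pvAssignAll l x = pvRotOnce l := by
  obtain ⟨hxlen, hxrow⟩ := hx
  have hout := pv_outer_getD l l.length x
  have hrowlen : ∀ i : Nat, i < l.length → l.length ≤ (l.getD i []).length := by
    intro i hi
    have hm : l.getD i [] ∈ l := by
      rw [List.getD_eq_getElem _ _ hi]; exact List.getElem_mem _
    exact hsq _ hm
  apply List.ext_getElem
  · show (pvAssignAll l x).length = (pvRotOnce l).length
    unfold pvAssignAll pvRotOnce
    rw [hout.1, hxlen]; simp
  · intro i h1 h2
    have hi : i < l.length := by
      have h1' := h1; unfold pvAssignAll at h1'; rw [hout.1, hxlen] at h1'; exact h1'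
    have hA : (pvAssignAll l x)[i] = pvRowFold l i l.length (x.getD i []) := by
      rw [← List.getD_eq_getElem _ [] h1]
      unfold pvAssignAll
      rw [hout.2 i, if_pos hi]
    have hB : (pvRotOnce l)[i]
        = ((List.range l.length).map (fun p => (l.getD (l.length - 1 - p) []).getD i 0))
          ++ (l.getD i []).drop l.length := by
      unfold pvRotOnce
      simp
    rw [hA, hB]
    have hx_i_len : (x.getD i []).length = (l.getD i []).length := (hxrow i).1
    have hge : l.length ≤ (l.getD i []).length := hrowlen i hi
    apply List.ext_getElem
    · rw [pv_rowFold_len, hx_i_len]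
      simp only [List.length_append, List.length_map, List.length_range, List.length_drop]
      omega
    · intro p hp1 hp2
      have hpl : p < (l.getD i []).length := by
        rw [pv_rowFold_len, hx_i_len] at hp1; exact hp1
      rw [← List.getD_eq_getElem _ 0 hp1, ← List.getD_eq_getElem _ 0 hp2]
      rw [pv_rowFold_getD l i l.length le_rfl _ (by omega) p]
      by_cases hpm : p < l.length
      · rw [if_pos ⟨by omega, hpm⟩]
        have hR : (((List.range l.length).map fun q => (l.getD (l.length - 1 - q) []).getD i 0)
              ++ (l.getD i []).drop l.length).getD p 0
            = (l.getD (l.length - 1 - p) []).getD i 0 := by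
          rw [List.getD_eq_getElem?_getD, List.getElem?_append_left (by simp [hpm])]
          simp [hpm]
        rw [hR]
      · rw [if_neg (by omega)]
        have hxl : (x.getD i []).getD p 0 = (l.getD i []).getD p 0 := by
          have hdrop := (hxrow i).2
          have e1 : ((x.getD i []).drop l.length)[p - l.length]? = (x.getD i [])[p]? := by
            rw [List.getElem?_drop]; congr 1; omega
          have e2 : ((l.getD i []).drop l.length)[p - l.length]? = (l.getD i [])[p]? := by
            rw [List.getElem?_drop]; congr 1; omega
          have g1 : (x.getD i []).getD p 0 = (x.getD i [])[p]?.getD 0 :=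
            List.getD_eq_getElem?_getD
          have g2 : (l.getD i []).getD p 0 = (l.getD i [])[p]?.getD 0 :=
            List.getD_eq_getElem?_getD
          rw [g1, g2, ← e1, hdrop, e2]
        rw [hxl]
        have hR : (((List.range l.length).map fun q => (l.getD (l.length - 1 - q) []).getD i 0)
              ++ (l.getD i []).drop l.length).getD p 0
            = (l.getD i []).getD p 0 := by
          rw [List.getD_eq_getElem?_getD, List.getElem?_append_right
            (by simp only [List.length_map, List.length_range]; omega)]
          rw [List.getElem?_drop]
          have g2 : (l.getD i []).getD p 0 = (l.getD i [])[p]?.getD 0 :=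
            List.getD_eq_getElem?_getD
          rw [g2]
          simp only [List.length_map, List.length_range]
          have hidx : l.length + (p - l.length) = p := by omega
          rw [hidx]
        rw [hR]

theorem pv_rotOnce_shape (l : List (List Int)) (hsq : ∀ row ∈ l, l.length ≤ row.length) :
    pvShape l (pvRotOnce l) := by
  refine ⟨pv_rotOnce_len l, ?_⟩
  intro j
  by_cases hj : j < l.length
  · rw [pv_rotOnce_getD l j hj]
    have hge : l.length ≤ (l.getD j []).length := pv_row_ge l hsq j hj
    constructor
    · simp only [List.length_append, List.length_map, List.length_range, List.length_drop]
      omega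
    · have hml : l.length
          = ((List.range l.length).map (fun p => (l.getD (l.length - 1 - p) []).getD j 0)).length := by
        simp
      have hdl : List.drop
            ((List.range l.length).map (fun p => (l.getD (l.length - 1 - p) []).getD j 0)).length
            (((List.range l.length).map (fun p => (l.getD (l.length - 1 - p) []).getD j 0))
              ++ (l.getD j []).drop l.length)
          = (l.getD j []).drop l.length := List.drop_left
      rw [← hml] at hdl
      exact hdl
  · have h1 : (pvRotOnce l).getD j [] = [] :=
      List.getD_eq_default _ _ (by rw [pv_rotOnce_len]; omega)
    have h2 : l.getD j [] = [] := List.getD_eq_default _ _ (by omega)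
    rw [h1, h2]
    exact ⟨rfl, rfl⟩

theorem pv_rotOnce_sq (l : List (List Int)) (hsq : ∀ row ∈ l, l.length ≤ row.length) :
    ∀ row ∈ pvRotOnce l, (pvRotOnce l).length ≤ row.length := by
  intro row hrow
  rw [pv_rotOnce_len]
  unfold pvRotOnce at hrow
  obtain ⟨j, hj, rfl⟩ := List.mem_map.mp hrow
  simp only [List.length_append, List.length_map, List.length_range, List.length_drop]
  have := pv_row_ge l hsq j (List.mem_range.mp hj)
  omega

theorem pv_fold_collapse (l : List (List Int)) (r : Nat) (hr : 1 ≤ r)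
    (hsq : ∀ row ∈ l, l.length ≤ row.length) :
    (List.range r).foldl (fun acc _ => pvAssignAll l acc) l = pvRotOnce l := by
  induction r with
  | zero => omega
  | succ r ih =>
    rw [List.range_succ, List.foldl_append, List.foldl_cons, List.foldl_nil]
    by_cases hr1 : 1 ≤ r
    · rw [ih hr1]
      exact pv_assignAll_eq l (pvRotOnce l) hsq (pv_rotOnce_shape l hsq)
    · have hr0 : r = 0 := by omega
      subst hr0
      simp only [List.range_zero, List.foldl_nil]
      exact pv_assignAll_eq l l hsq ⟨rfl, fun j => ⟨rfl, rfl⟩⟩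

theorem pv_main (k : Nat) : ∀ (l : List (List Int)) (n : Int),
    (PySem.Int.mod n 4).toNat ≤ k → (∀ row ∈ l, l.length ≤ row.length) →
    rotate_transform l n = pvRotOnce^[(PySem.Int.mod n 4).toNat] l := by
  have h4 : ∀ z : Int, PySem.Int.mod z 4 = z % 4 :=
    fun z => PySem.Int.mod_eq_emod_of_pos (by norm_num)
  induction k with
  | zero =>
    intro l n hle hsq
    rw [rotate_transform, dif_neg (by rw [h4] at hle ⊢; omega)]
    rw [show (PySem.Int.mod n 4).toNat = 0 from by rw [h4] at hle ⊢; omega]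
    rfl
  | succ k ih =>
    intro l n hle hsq
    by_cases h1 : 1 ≤ PySem.Int.mod n 4
    · have e1 : PySem.Int.mod n 4 = n % 4 := h4 n
      have e2 : PySem.Int.mod (PySem.Int.mod n 4 - 1) 4 = n % 4 - 1 := by
        rw [e1, h4]; omega
      rw [rotate_transform, dif_pos h1]
      rw [pv_fold_collapse l _ (by rw [e1] at h1; omega) hsq]
      rw [ih (pvRotOnce l) (PySem.Int.mod n 4 - 1)
        (by rw [e2]; rw [e1] at hle; omega) (pv_rotOnce_sq l hsq)]
      rw [e2]
      rw [show pvRotOnce^[(n % 4 - 1).toNat] (pvRotOnce l)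
            = pvRotOnce^[(n % 4 - 1).toNat + 1] l from
          (Function.iterate_succ_apply pvRotOnce _ l).symm]
      congr 1
      rw [e1]
      rw [e1] at h1
      omega
    · rw [rotate_transform, dif_neg h1]
      rw [show (PySem.Int.mod n 4).toNat = 0 from by rw [h4] at h1 ⊢; omega]
      rfl

-- exact squareness: every row's length equals the number of rows
def pvSquare (l : List (List Int)) : Prop := ∀ row ∈ l, row.length = l.length

theorem pv_foldl_min_const (xs : List Nat) (m : Nat) (h : ∀ x ∈ xs, x = m) :
    xs.foldl min m = m := by
  induction xs with
  | nil => rfl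
  | cons x xs ih =>
    have hx : x = m := h x (by simp)
    simp only [List.foldl_cons, hx, min_self]
    exact ih (fun y hy => h y (by simp [hy]))

theorem pv_min_const (xs : List Nat) (m : Nat) (hne : xs ≠ []) (h : ∀ x ∈ xs, x = m) :
    xs.min? = some m := by
  cases xs with
  | nil => exact absurd rfl hne
  | cons x xs =>
    have hx : x = m := h x (by simp)
    rw [List.min?_cons']
    subst hx
    rw [pv_foldl_min_const xs x (fun y hy => h y (by simp [hy]))]

theorem pv_zipRot_eq (l : List (List Int)) (hsq : pvSquare l) : pvZipRot l = pvRotOnce l := by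
  cases hl : l with
  | nil => rfl
  | cons r rs =>
    rw [← hl]
    have hk : ((l.map List.length).min?).getD 0 = l.length := by
      rw [pv_min_const (l.map List.length) l.length (by simp [hl])
        (by intro x hx; obtain ⟨row, hrow, rfl⟩ := List.mem_map.mp hx; exact hsq row hrow)]
      rfl
    unfold pvZipRot pvRotOnce
    rw [hk]
    apply List.map_congr_left
    intro j hj
    have hjm : j < l.length := List.mem_range.mp hj
    have hrowj : (l.getD j []).length = l.length := by
      have hm : l.getD j [] ∈ l := by
        rw [List.getD_eq_getElem _ _ hjm]; exact List.getElem_mem _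
      exact hsq _ hm
    have hdrop : (l.getD j []).drop l.length = [] := by
      apply List.drop_eq_nil_of_le; omega
    rw [hdrop, List.append_nil]
    apply List.ext_getElem
    · simp
    · intro p hp1 hp2
      simp only [List.length_map, List.length_reverse] at hp1
      rw [List.getElem_map, List.getElem_reverse, List.getElem_map, List.getElem_range]
      congr 1
      rw [List.getD_eq_getElem _ _ (show l.length - 1 - p < l.length by omega)]

theorem pv_rotOnce_square (l : List (List Int)) (hsq : pvSquare l) : pvSquare (pvRotOnce l) := by
  intro row hrow
  rw [pv_rotOnce_len]
  unfold pvRotOnce at hrow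
  obtain ⟨j, hj, rfl⟩ := List.mem_map.mp hrow
  have hjm : j < l.length := List.mem_range.mp hj
  have hrowj : (l.getD j []).length = l.length := by
    have hm : l.getD j [] ∈ l := by
      rw [List.getD_eq_getElem _ _ hjm]; exact List.getElem_mem _
    exact hsq _ hm
  simp only [List.length_append, List.length_map, List.length_range, List.length_drop]
  omega

theorem pv_sq_iter (l : List (List Int)) (hsq : pvSquare l) (k : Nat) :
    (List.range k).foldl (fun cur _ => pvZipRot cur) l = pvRotOnce^[k] l := by
  induction k with
  | zero => rfl
  | succ k ih =>
    rw [List.range_succ, List.foldl_append, List.foldl_cons, List.foldl_nil, ih]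
    rw [Function.iterate_succ_apply' pvRotOnce k l]
    have hsqk : pvSquare (pvRotOnce^[k] l) := by
      clear ih
      induction k with
      | zero => exact hsq
      | succ k ih2 =>
        rw [Function.iterate_succ_apply' pvRotOnce k l]
        exact pv_rotOnce_square _ ih2
    exact pv_zipRot_eq _ hsqk

-- ===== VERDICT (by name: the statement is the Claim_ definition above) =====
theorem rotate_transform_spec : Claim_unchanged_rotate_transform := by
  intro l n _ hpre
  unfold Spec_rotate_transform
  intro hnd
  unfold rotate_transform_alt
  have h4 : PySem.Int.mod n 4 = n % 4 := PySem.Int.mod_eq_emod_of_pos (by norm_num)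
  by_cases h0 : PySem.Int.mod n 4 = 0
  · have h0' : n % 4 = 0 := by rw [← h4]; exact h0
    rw [rotate_transform]
    simp [h0']
  · have h1 : 1 ≤ PySem.Int.mod n 4 := by rw [h4] at h0 ⊢; omega
    have hsq' : ∀ row ∈ l, l.length ≤ row.length := by
      rcases hpre with h | h
      · exact absurd h h0
      · exact h
    have hsq : pvSquare l := by
      intro row hrow
      by_contra hne
      exact hnd ⟨h1, row, hrow, hne⟩
    rw [pv_main (PySem.Int.mod n 4).toNat l n le_rfl hsq', pv_sq_iter l hsq]

theorem rotate_transform_changed : Claim_changed_rotate_transform := by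
  unfold Claim_changed_rotate_transform
  refine ⟨by decide, by decide, by decide, ?_, by decide, by decide⟩
  show rotate_transform [[1, 2, 3], [4, 5, 6]] 1 = [[4, 1, 3], [5, 2, 6]]
  rw [pv_main 1 [[1, 2, 3], [4, 5, 6]] 1 (by decide) (by decide)]
  decide
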